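-- pv_equiv track=rewrite | github.com/sammwaughh/Project-Eulers | problem-61.py | octagonals_under_m
-- ===== SOURCE A (Python) =====
-- def octagonals_under_m(m):
--     i = 1
--     is_octagonal = [False] * m
--     t = 1
--     while t < m:
--         is_octagonal[t] = True
--         i += 6
--         t += i
--     return is_octagonal
-- ===== SOURCE B (Python) =====
-- def _is_octagonal(t):
--     # binary search for n with n*(3*n-2) <= t < (n+1)*(3*(n+1)-2)
--     lo, hi = 0, t + 1
--     while hi - lo > 1:
--         mid = (lo + hi) // 2
--         if mid * (3 * mid - 2) <= t:
--             lo = mid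
--         else:
--             hi = mid
--     return lo >= 1 and lo * (3 * lo - 2) == t
--
--
-- def octagonals_under_m(m):
--     return [_is_octagonal(t) for t in range(m)]
-- ===== Notes on version B (the rewrite author's own statement) =====
-- stated objective: alternative
-- what changed: B replaces A's incremental sieve (running difference i, running sum t, in-place marking) by an independent per-index membership test: for each t in range(m) it binary-searches the inverse of n*(3n-2) and checks the formula, building the list with a comprehension.
import Mathlib
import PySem

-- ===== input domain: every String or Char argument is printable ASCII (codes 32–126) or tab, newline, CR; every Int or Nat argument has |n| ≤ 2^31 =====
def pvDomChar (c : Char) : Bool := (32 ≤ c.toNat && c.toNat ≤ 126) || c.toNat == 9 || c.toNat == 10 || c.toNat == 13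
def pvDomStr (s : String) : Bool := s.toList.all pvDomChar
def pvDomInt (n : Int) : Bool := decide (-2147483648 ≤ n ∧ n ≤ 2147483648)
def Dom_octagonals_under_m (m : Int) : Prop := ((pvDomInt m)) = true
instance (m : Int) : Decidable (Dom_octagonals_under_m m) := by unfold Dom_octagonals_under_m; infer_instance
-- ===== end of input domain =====

-- B replaces A's incremental sieve (running difference and sum, in-place marking)
-- by an independent per-index membership test via binary search of the inverse of
-- n*(3n-2) (objective: alternative).


-- ===== PORT A =====
-- A's while loop: state (i, t, list); the '0 < i' guard only makes the recursion
-- total (it holds at every reachable state, where i ≥ 1).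
def octLoopA (m i t : Int) (l : List Bool) : List Bool :=
  if _h : t < m ∧ 0 < i then
    octLoopA m (i + 6) (t + (i + 6)) (l.set t.toNat true)
  else l
termination_by (m - t).toNat
decreasing_by omega

def octagonals_under_m (m : Int) : List Bool :=
  octLoopA m 1 1 (List.replicate m.toNat false)

-- ===== PORT B =====
-- B's binary-search loop on lo, hi: invariant lo*(3lo-2) ≤ t < hi*(3hi-2).
def bsearchLoop (t lo hi : Int) : Int :=
  if _h : 1 < hi - lo then
    let mid := PySem.Int.floordiv (lo + hi) 2
    if mid * (3 * mid - 2) ≤ t then bsearchLoop t mid hi else bsearchLoop t lo mid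
  else lo
termination_by (hi - lo).toNat
decreasing_by
  all_goals
    have hb := PySem.Int.floordiv_two_mid_bounds (lo := lo) (hi := hi) (by omega)
    have h2 : PySem.Int.floordiv (lo + hi) 2 = (lo + hi) / 2 :=
      PySem.Int.floordiv_eq_ediv_of_pos (by omega)
    simp only [mid, h2] at *
    omega

def isOctagonal (t : Int) : Bool :=
  let lo := bsearchLoop t 0 (t + 1)
  decide (1 ≤ lo ∧ lo * (3 * lo - 2) = t)

def octagonals_under_m_alt (m : Int) : List Bool :=
  (PySem.List.pyRange 0 m 1).map isOctagonal

-- ===== PRECONDITION & SPEC =====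
def Spec_octagonals_under_m (m : Int) (out : List Bool) : Prop := out = octagonals_under_m_alt m
instance (m : Int) (out : List Bool) : Decidable (Spec_octagonals_under_m m out) := by unfold Spec_octagonals_under_m; infer_instance

-- ===== CLAIM (what is proved, stated in full; the proofs are below) =====
def Claim_equal_octagonals_under_m : Prop := ∀ (m : Int), Dom_octagonals_under_m m → Spec_octagonals_under_m m (octagonals_under_m m)

-- ===== LEMMAS AND PROOFS =====

-- f n := n*(3n-2) is strictly monotone on nonnegative arguments.
theorem oct_mono {a b : Int} (ha : 0 ≤ a) (hab : a < b) :
    a * (3 * a - 2) < b * (3 * b - 2) := by nlinarith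

-- Binary search correctness: with the invariant established, the result r
-- satisfies 0 ≤ r, r*(3r-2) ≤ t < (r+1)*(3(r+1)-2).
theorem bsearchLoop_correct (t lo hi : Int) (h0 : 0 ≤ lo) (hlh : lo < hi)
    (hlo : lo * (3 * lo - 2) ≤ t) (hhi : t < hi * (3 * hi - 2)) :
    0 ≤ bsearchLoop t lo hi ∧
      bsearchLoop t lo hi * (3 * bsearchLoop t lo hi - 2) ≤ t ∧
      t < (bsearchLoop t lo hi + 1) * (3 * (bsearchLoop t lo hi + 1) - 2) := by
  rw [bsearchLoop]
  by_cases hgap : 1 < hi - lo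
  · rw [dif_pos hgap]
    have h2 : PySem.Int.floordiv (lo + hi) 2 = (lo + hi) / 2 :=
      PySem.Int.floordiv_eq_ediv_of_pos (by omega)
    have hb := PySem.Int.floordiv_two_mid_bounds (lo := lo) (hi := hi) (by omega)
    set mid := PySem.Int.floordiv (lo + hi) 2 with hmid
    have hltm : lo < mid := by omega
    have hmlt : mid < hi := by omega
    by_cases hc : mid * (3 * mid - 2) ≤ t
    · rw [if_pos hc]
      exact bsearchLoop_correct t mid hi (by omega) hmlt hc hhi
    · rw [if_neg hc]
      exact bsearchLoop_correct t lo mid h0 hltm hlo (by omega)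
  · rw [dif_neg hgap]
    have : hi = lo + 1 := by omega
    subst this
    exact ⟨h0, hlo, hhi⟩
termination_by (hi - lo).toNat
decreasing_by all_goals omega

-- Characterisation of B's per-index test.
theorem isOctagonal_iff (t : Int) (ht : 0 ≤ t) :
    isOctagonal t = true ↔ ∃ n : Int, 1 ≤ n ∧ n * (3 * n - 2) = t := by
  unfold isOctagonal
  have hc := bsearchLoop_correct t 0 (t + 1) le_rfl (by omega) (by omega) (by nlinarith)
  set r := bsearchLoop t 0 (t + 1) with hr
  simp only [decide_eq_true_eq]
  constructor
  · rintro ⟨h1, h2⟩; exact ⟨r, h1, h2⟩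
  · rintro ⟨n, hn1, hn2⟩
    have hnr : n = r := by
      by_contra hne
      rcases lt_or_gt_of_ne hne with hlt | hgt
      · have := oct_mono (a := n) (b := r) (by omega) hlt
        omega
      · have : r + 1 ≤ n := by omega
        rcases lt_or_eq_of_le this with hlt | heq
        · have := oct_mono (a := r + 1) (b := n) (by omega) hlt
          omega
        · subst heq
          omega
    exact ⟨hnr ▸ hn1, hnr ▸ hn2⟩

-- A's loop preserves the list length.
theorem octLoopA_length (m i t : Int) (l : List Bool) :
    (octLoopA m i t l).length = l.length := by
  rw [octLoopA]
  split
  · rw [octLoopA_length]; exact l.length_set ..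
  · rfl
termination_by (m - t).toNat
decreasing_by omega

-- Characterisation of A's sieve loop at the reachable states i = 6n-5, t = n*(3n-2):
-- position j ends true iff some k ≥ n has k*(3k-2) = j, or it was already true.
theorem octLoopA_getElem? (m n : Int) (hn : 1 ≤ n) (l : List Bool)
    (hlen : (l.length : Int) = m) (j : Nat) (hj : j < l.length) :
    ((octLoopA m (6 * n - 5) (n * (3 * n - 2)) l)[j]? = some true) ↔
      ((∃ k : Int, n ≤ k ∧ k * (3 * k - 2) = (j : Int)) ∨ l[j]? = some true) := by
  rw [octLoopA]
  by_cases hlt : n * (3 * n - 2) < m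
  · rw [dif_pos ⟨hlt, by omega⟩]
    have e1 : (6 * n - 5) + 6 = 6 * (n + 1) - 5 := by ring
    have e2 : n * (3 * n - 2) + (6 * (n + 1) - 5) = (n + 1) * (3 * (n + 1) - 2) := by ring
    rw [e1, e2]
    have hfn : 1 ≤ n * (3 * n - 2) := by nlinarith
    have hset : (l.set (n * (3 * n - 2)).toNat true).length = l.length := l.length_set ..
    have ih := octLoopA_getElem? m (n + 1) (by omega) (l.set (n * (3 * n - 2)).toNat true)
      (by rw [hset]; exact hlen) j (by rw [hset]; exact hj)
    rw [ih, List.getElem?_set]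
    have hplt : (n * (3 * n - 2)).toNat < l.length := by omega
    constructor
    · rintro (⟨k, hk1, hk2⟩ | hold)
      · exact Or.inl ⟨k, by omega, hk2⟩
      · by_cases hpj : (n * (3 * n - 2)).toNat = j
        · exact Or.inl ⟨n, le_refl n, by omega⟩
        · rw [if_neg hpj] at hold
          exact Or.inr hold
    · rintro (⟨k, hk1, hk2⟩ | hold)
      · rcases eq_or_lt_of_le hk1 with heq | hlt'
        · right
          subst heq
          rw [if_pos (show (n * (3 * n - 2)).toNat = j by omega), if_pos hplt]
        · exact Or.inl ⟨k, by omega, hk2⟩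
      · right
        by_cases hpj : (n * (3 * n - 2)).toNat = j
        · rw [if_pos hpj, if_pos hplt]
        · rw [if_neg hpj]
          exact hold
  · rw [dif_neg (by tauto)]
    constructor
    · exact Or.inr
    · rintro (⟨k, hk1, hk2⟩ | hold)
      · exfalso
        have hfk : n * (3 * n - 2) ≤ k * (3 * k - 2) := by
          rcases eq_or_lt_of_le hk1 with heq | hlt'
          · rw [heq]
          · exact le_of_lt (oct_mono (by omega) hlt')
        omega
      · exact hold
termination_by (m - n * (3 * n - 2)).toNat
decreasing_by
  have _h3 : n * (3 * n - 2) < (n + 1) * (3 * (n + 1) - 2) := by nlinarith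
  omega

-- ===== VERDICT (by name: the statement is the Claim_ definition above) =====
theorem octagonals_under_m_spec : Claim_equal_octagonals_under_m := by
  intro m _
  show octagonals_under_m m = octagonals_under_m_alt m
  unfold octagonals_under_m octagonals_under_m_alt
  by_cases hm : 0 ≤ m
  · apply List.ext_getElem?
    intro j
    by_cases hjm : j < m.toNat
    · have hjl : j < (List.replicate m.toNat false).length := by
        simp only [List.length_replicate]; exact hjm
      have hBj : ((PySem.List.pyRange 0 m 1).map isOctagonal)[j]? =
          some (isOctagonal (j : Int)) := by
        rw [PySem.List.pyRange_one, List.map_map, List.getElem?_map]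
        have hr : (List.range (m - 0).toNat)[j]? = some j := List.getElem?_range (by omega)
        rw [hr]
        simp
      have hA := octLoopA_getElem? m 1 le_rfl (List.replicate m.toNat false)
        (by simp only [List.length_replicate]; omega) j hjl
      norm_num at hA
      have hAlen : j < (octLoopA m 1 1 (List.replicate m.toNat false)).length := by
        rw [octLoopA_length]; exact hjl
      rw [hBj, List.getElem?_eq_getElem hAlen]
      have hrep : (List.replicate m.toNat false)[j]? = some false := by
        simp [hjm]
      rw [hrep] at hA
      norm_num at hA
      have hB := isOctagonal_iff (j : Int) (by positivity)
      rcases hBool : isOctagonal (j : Int) with _ | _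
      · rcases hA2 : (octLoopA m 1 1 (List.replicate m.toNat false))[j]'hAlen with _ | _
        · rfl
        · exfalso
          have := hA.mp (by rw [List.getElem?_eq_getElem hAlen, hA2])
          rw [← hB, hBool] at this
          exact Bool.false_ne_true this
      · have : (octLoopA m 1 1 (List.replicate m.toNat false))[j]? = some true :=
          hA.mpr (hB.mp hBool)
        rw [List.getElem?_eq_getElem hAlen] at this
        rw [Option.some.injEq] at this
        rw [this]
    · have h1 : (octLoopA m 1 1 (List.replicate m.toNat false))[j]? = none := by
        rw [List.getElem?_eq_none_iff, octLoopA_length, List.length_replicate]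
        omega
      have h2 : ((PySem.List.pyRange 0 m 1).map isOctagonal)[j]? = none := by
        rw [List.getElem?_eq_none_iff, List.length_map, PySem.List.length_pyRange_one]
        omega
      rw [h1, h2]
  · have hm0 : m.toNat = 0 := by omega
    rw [hm0, PySem.List.pyRange_one_eq_nil (by omega)]
    rw [octLoopA, dif_neg (by simp; omega)]
    rfl
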